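-- pv_equiv track=rewrite | github.com/jeromehtz/mes_projets | Python/EPITA/algo-epita/tests.py | supprimer_pas_enplace
-- ===== SOURCE A (Python) =====
-- def supprimer_pas_enplace(L,k) :
--     l = len(L)
--     if k<0 or k>=l :
--         raise Exception("supprimer_pas_enplace : inice invalide")
--     else :
--         L1 = []
--         for i in range(l) :
--             if i!= k :
--                 L1.append(L[i])
--         return L1
-- ===== SOURCE B (Python) =====
-- def supprimer_pas_enplace(L, k):
--     if k < 0 or k >= len(L):
--         raise Exception("supprimer_pas_enplace : inice invalide")
--     return L[:k] + L[k+1:]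
-- ===== Notes on version B (the rewrite author's own statement) =====
-- stated objective: simpler
-- what changed: Replaces the per-index filter-and-append loop with the concatenation of two slices L[:k] + L[k+1:], keeping the same bounds guard and exception.
import Mathlib
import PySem

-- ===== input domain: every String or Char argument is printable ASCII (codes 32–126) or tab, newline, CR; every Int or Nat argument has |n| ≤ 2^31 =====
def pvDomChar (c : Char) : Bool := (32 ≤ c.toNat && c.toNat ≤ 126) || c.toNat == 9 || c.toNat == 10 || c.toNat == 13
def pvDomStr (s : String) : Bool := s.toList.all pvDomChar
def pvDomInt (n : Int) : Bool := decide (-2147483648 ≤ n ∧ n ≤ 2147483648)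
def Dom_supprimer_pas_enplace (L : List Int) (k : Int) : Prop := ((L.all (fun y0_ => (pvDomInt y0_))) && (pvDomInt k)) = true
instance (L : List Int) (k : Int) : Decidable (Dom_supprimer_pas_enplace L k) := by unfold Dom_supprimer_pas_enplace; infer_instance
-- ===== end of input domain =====

-- B builds the result as the concatenation of two slices L[:k] ++ L[k+1:] instead of A's filtered append loop (objective: simpler).

-- ===== PORT A =====
def supprimer_pas_enplace (L : List Int) (k : Int) : List Int :=
  let l : Int := PySem.List.len L
  if k < 0 ∨ k ≥ l then []  -- Python raises Exception here; excluded by Pre_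
  else
    (PySem.List.pyRange 0 l 1).foldl
      (fun L1 i => if i ≠ k then L1 ++ [PySem.List.pyGetD L i 0] else L1) []

-- ===== PORT B =====
def supprimer_pas_enplace_alt (L : List Int) (k : Int) : List Int :=
  if k < 0 ∨ k ≥ PySem.List.len L then []  -- Python raises Exception here; excluded by Pre_
  else PySem.List.slice L none (some k) ++ PySem.List.slice L (some (k + 1)) none

-- ===== PRECONDITION & SPEC =====
-- Pre_ excludes exactly the inputs where A raises its out-of-range Exception.
def Pre_supprimer_pas_enplace (L : List Int) (k : Int) : Prop :=
  0 ≤ k ∧ k < PySem.List.len L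
instance (L : List Int) (k : Int) : Decidable (Pre_supprimer_pas_enplace L k) := by
  unfold Pre_supprimer_pas_enplace; infer_instance

def pvWitness_supprimer_pas_enplace : List Int × Int := ([3, 1, 4], 1)

def Spec_supprimer_pas_enplace (L : List Int) (k : Int) (out : List Int) : Prop := out = supprimer_pas_enplace_alt L k
instance (L : List Int) (k : Int) (out : List Int) : Decidable (Spec_supprimer_pas_enplace L k out) := by unfold Spec_supprimer_pas_enplace; infer_instance

-- ===== CLAIM (what is proved, stated in full; the proofs are below) =====
def Claim_equal_supprimer_pas_enplace : Prop := ∀ (L : List Int) (k : Int), Dom_supprimer_pas_enplace L k → Pre_supprimer_pas_enplace L k → Spec_supprimer_pas_enplace L k (supprimer_pas_enplace L k)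

-- ===== LEMMAS AND PROOFS =====

-- the first n getitem lookups, in order, reproduce the first n elements
lemma map_pyGetD_pyRange_take (L : List Int) (n : Nat) (d : Int) (hn : n ≤ L.length) :
    (PySem.List.pyRange 0 (n : Int) 1).map (fun j => PySem.List.pyGetD L j d) = L.take n := by
  induction n with
  | zero => simp [PySem.List.pyRange_one_eq_nil]
  | succ m ih =>
    have h1 : ((m : Int) : Int) + 1 = ((m + 1 : Nat) : Int) := by push_cast; ring
    have := PySem.List.pyRange_one_succ_right (a := 0) (b := (m : Int)) (by positivity)
    rw [show ((m + 1 : Nat) : Int) = (m : Int) + 1 by push_cast; ring, this]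
    rw [List.map_append, ih (by omega)]
    have hm : m < L.length := by omega
    rw [List.take_add_one, List.getElem?_eq_getElem hm]
    simp [PySem.List.pyGetD_natCast, hm]

theorem supprimer_pas_enplace_spec : Claim_equal_supprimer_pas_enplace := by
  intro L k _ hpre
  obtain ⟨hk0, hklt⟩ := hpre
  unfold Spec_supprimer_pas_enplace supprimer_pas_enplace supprimer_pas_enplace_alt
  simp only [PySem.List.len] at hklt ⊢
  rw [if_neg (by omega), if_neg (by omega)]
  -- B side: two slices
  rw [PySem.List.slice_to L hk0, PySem.List.slice_from L (by omega)]
  -- A side: filtered append loop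
  rw [PySem.List.foldl_append_ite (p := fun i => i ≠ k) (f := fun i => PySem.List.pyGetD L i 0)]
  rw [PySem.List.pyRange_one_append 0 k (L.length : Int) hk0 (le_of_lt hklt)]
  rw [PySem.List.pyRange_one_cons hklt]
  rw [List.filter_append, List.filter_cons]
  simp only [ne_eq, not_true_eq_false, decide_false, Bool.false_eq_true,
    if_false]
  have hf1 : (PySem.List.pyRange 0 k 1).filter (fun i => decide (i ≠ k)) = PySem.List.pyRange 0 k 1 := by
    apply List.filter_eq_self.mpr
    intro a ha
    have := (PySem.List.mem_pyRange_one).mp ha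
    simp; omega
  have hf2 : (PySem.List.pyRange (k + 1) (L.length : Int) 1).filter (fun i => decide (i ≠ k)) = PySem.List.pyRange (k + 1) (L.length : Int) 1 := by
    apply List.filter_eq_self.mpr
    intro a ha
    have := (PySem.List.mem_pyRange_one).mp ha
    simp; omega
  rw [hf1, hf2, List.map_append, List.nil_append]
  congr 1
  · -- prefix = take k
    have hkequiv : k = ((k.toNat : Nat) : Int) := by omega
    rw [hkequiv, map_pyGetD_pyRange_take L k.toNat 0 (by omega)]
    congr 1
  · -- suffix = drop (k+1)
    exact PySem.List.map_pyGetD_pyRange (xs := L) (a := k + 1) (d := 0) (by omega)
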